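-- pv_equiv track=rewrite | github.com/MajBijol147/Uvod_v_programiranje | Tomo/Vaje/Seznami in nabori/10_permutacije.py | je_seznam_ciklov
-- ===== SOURCE A (Python) =====
-- def je_seznam_ciklov(sez):
--     st = []
--     for cikel in sez:
--         for el in cikel:
--             if el <= 0:
--                 return False
--             st.append(el)
--             if st.count(el) > 1:
--                 return False
--     return True
-- ===== SOURCE B (Python) =====
-- def je_seznam_ciklov(sez):
--     vsi = [el for cikel in sez for el in cikel]
--     for el in vsi:
--         if el <= 0:
--             return False
--     vsi.sort()
--     for i in range(1, len(vsi)):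
--         if vsi[i] == vsi[i - 1]:
--             return False
--     return True
-- ===== Notes on version B (the rewrite author's own statement) =====
-- stated objective: simpler
-- what changed: Replaced A's interleaved append-and-count duplicate scan inside the nested loops by: flatten once, one positivity pass, then sort a fresh local list and compare adjacent elements.
import Mathlib
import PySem

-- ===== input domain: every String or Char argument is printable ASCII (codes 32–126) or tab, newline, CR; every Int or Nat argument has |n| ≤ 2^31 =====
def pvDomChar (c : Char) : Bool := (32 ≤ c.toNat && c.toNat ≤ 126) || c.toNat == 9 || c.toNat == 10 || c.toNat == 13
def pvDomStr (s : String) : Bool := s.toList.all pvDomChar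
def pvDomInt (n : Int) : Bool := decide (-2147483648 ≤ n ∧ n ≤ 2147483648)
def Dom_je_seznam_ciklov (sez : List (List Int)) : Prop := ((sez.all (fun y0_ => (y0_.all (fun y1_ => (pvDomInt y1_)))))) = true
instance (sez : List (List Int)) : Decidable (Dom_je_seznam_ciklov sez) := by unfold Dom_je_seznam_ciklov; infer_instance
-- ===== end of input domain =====

-- B flattens once, does one positivity pass, then sorts a fresh local list and compares
-- adjacent elements, instead of A's append-and-count duplicate scan inside the nested loops.

-- ===== PORT A =====
-- inner 'for el in cikel' loop with the accumulated list st; none = an early 'return False'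
def jeCikelA : List Int → List Int → Option (List Int)
  | st, [] => some st
  | st, el :: rest =>
    if el ≤ 0 then none
    else
      let st' := st ++ [el]
      if PySem.List.count st' el > 1 then none
      else jeCikelA st' rest

-- outer 'for cikel in sez' loop
def jeLoopA : List Int → List (List Int) → Bool
  | _, [] => true
  | st, c :: cs =>
    match jeCikelA st c with
    | none => false
    | some st' => jeLoopA st' cs

def je_seznam_ciklov (sez : List (List Int)) : Bool := jeLoopA [] sez

-- ===== PORT B =====
-- 'for i in range(1, len(vsi)): if vsi[i] == vsi[i-1]: return False' as adjacent-pair recursion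
def adjDupB : List Int → Bool
  | [] => false
  | [_] => false
  | a :: b :: t => a == b || adjDupB (b :: t)

def je_seznam_ciklov_alt (sez : List (List Int)) : Bool :=
  let vsi := sez.flatMap (fun cikel => cikel)
  if vsi.any (fun el => decide (el ≤ 0)) then false
  else !adjDupB (PySem.List.sorted vsi (fun x => x) false)

-- ===== PRECONDITION & SPEC =====
def Spec_je_seznam_ciklov (sez : List (List Int)) (out : Bool) : Prop := out = je_seznam_ciklov_alt sez
instance (sez : List (List Int)) (out : Bool) : Decidable (Spec_je_seznam_ciklov sez out) := by unfold Spec_je_seznam_ciklov; infer_instance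

-- ===== CLAIM (what is proved, stated in full; the proofs are below) =====
def Claim_equal_je_seznam_ciklov : Prop := ∀ (sez : List (List Int)), Dom_je_seznam_ciklov sez → Spec_je_seznam_ciklov sez (je_seznam_ciklov sez)

-- ===== LEMMAS AND PROOFS =====

lemma cikelA_eq (c : List Int) : ∀ (st : List Int), st.Nodup →
    jeCikelA st c =
      if (∀ el ∈ c, 0 < el) ∧ (st ++ c).Nodup then some (st ++ c) else none := by
  induction c with
  | nil =>
    intro st h
    simp [jeCikelA, h]
  | cons el rest ih =>
    intro st h
    rw [jeCikelA]
    have hcnt : PySem.List.count (st ++ [el]) el = st.count el + 1 := by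
      simp [PySem.List.count_eq, List.count_append]
    by_cases hle : el ≤ 0
    · have hno : ¬ ((∀ x ∈ el :: rest, 0 < x) ∧ (st ++ el :: rest).Nodup) := by
        rintro ⟨hp, _⟩; have := hp el (by simp); omega
      rw [if_pos hle, if_neg hno]
    · rw [if_neg hle]
      by_cases hmem : el ∈ st
      · have hgt : PySem.List.count (st ++ [el]) el > 1 := by
          have := List.count_pos_iff.mpr hmem
          omega
        have hno : ¬ ((∀ x ∈ el :: rest, 0 < x) ∧ (st ++ el :: rest).Nodup) := by
          rintro ⟨_, hn⟩
          rcases List.nodup_append.mp hn with ⟨_, _, hdis⟩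
          exact hdis el hmem el (by simp) rfl
        show (if PySem.List.count (st ++ [el]) el > 1 then none
              else jeCikelA (st ++ [el]) rest) = _
        rw [if_pos hgt, if_neg hno]
      · have hngt : ¬ PySem.List.count (st ++ [el]) el > 1 := by
          have := List.count_eq_zero_of_not_mem hmem
          omega
        have hnod : (st ++ [el]).Nodup := by
          rw [List.nodup_append]
          refine ⟨h, List.nodup_singleton el, ?_⟩
          intro a ha b hb
          rw [List.mem_singleton] at hb
          subst hb
          exact fun e => hmem (e ▸ ha)
        show (if PySem.List.count (st ++ [el]) el > 1 then none
              else jeCikelA (st ++ [el]) rest) = _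
        rw [if_neg hngt, ih (st ++ [el]) hnod]
        have hassoc : st ++ [el] ++ rest = st ++ el :: rest := by simp
        rw [hassoc]
        have hiff : ((∀ x ∈ rest, 0 < x) ∧ (st ++ el :: rest).Nodup) ↔
            ((∀ x ∈ el :: rest, 0 < x) ∧ (st ++ el :: rest).Nodup) := by
          constructor
          · rintro ⟨hp, hn⟩
            refine ⟨?_, hn⟩
            intro x hx
            rcases List.mem_cons.mp hx with rfl | hx
            · omega
            · exact hp x hx
          · rintro ⟨hp, hn⟩
            exact ⟨fun x hx => hp x (List.mem_cons_of_mem _ hx), hn⟩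
        simp only [hiff]

lemma loopA_eq (cs : List (List Int)) : ∀ (st : List Int), st.Nodup →
    jeLoopA st cs =
      decide ((∀ el ∈ cs.flatMap (fun c => c), 0 < el) ∧
              (st ++ cs.flatMap (fun c => c)).Nodup) := by
  induction cs with
  | nil =>
    intro st h
    simp [jeLoopA, h]
  | cons c cs ih =>
    intro st h
    rw [jeLoopA, cikelA_eq c st h]
    by_cases hcond : (∀ el ∈ c, 0 < el) ∧ (st ++ c).Nodup
    · rw [if_pos hcond]
      show jeLoopA (st ++ c) cs = _
      rw [ih (st ++ c) hcond.2]
      have hq : st ++ c ++ cs.flatMap (fun c => c) = st ++ (c :: cs).flatMap (fun c => c) := by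
        simp
      rw [hq]
      have hiff : ((∀ el ∈ cs.flatMap (fun c => c), 0 < el) ∧
            (st ++ (c :: cs).flatMap (fun c => c)).Nodup) ↔
          ((∀ el ∈ (c :: cs).flatMap (fun c => c), 0 < el) ∧
            (st ++ (c :: cs).flatMap (fun c => c)).Nodup) := by
        constructor
        · rintro ⟨hp, hn⟩
          refine ⟨?_, hn⟩
          intro x hx
          rcases List.mem_flatMap.mp hx with ⟨d, hd, hxd⟩
          rcases List.mem_cons.mp hd with rfl | hd
          · exact hcond.1 x hxd
          · exact hp x (List.mem_flatMap.mpr ⟨d, hd, hxd⟩)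
        · rintro ⟨hp, hn⟩
          refine ⟨?_, hn⟩
          intro x hx
          rcases List.mem_flatMap.mp hx with ⟨d, hd, hxd⟩
          exact hp x (List.mem_flatMap.mpr ⟨d, List.mem_cons_of_mem _ hd, hxd⟩)
      simp only [hiff]
    · rw [if_neg hcond]
      have hno : ¬ ((∀ el ∈ (c :: cs).flatMap (fun c => c), 0 < el) ∧
          (st ++ (c :: cs).flatMap (fun c => c)).Nodup) := by
        rintro ⟨hp, hn⟩
        apply hcond
        constructor
        · intro x hx
          exact hp x (List.mem_flatMap.mpr ⟨c, by simp, hx⟩)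
        · have hq : st ++ (c :: cs).flatMap (fun c => c) =
              (st ++ c) ++ cs.flatMap (fun c => c) := by simp
          rw [hq] at hn
          exact (List.nodup_append.mp hn).1
      show false = _
      exact (decide_eq_false hno).symm

lemma adjDup_lt (l : List Int) (hs : l.Pairwise (· ≤ ·)) (ha : adjDupB l = false) :
    l.Pairwise (· < ·) := by
  induction l with
  | nil => simp
  | cons a t ih =>
    cases t with
    | nil => simp
    | cons b t' =>
      rw [adjDupB] at ha
      simp only [Bool.or_eq_false_iff, beq_eq_false_iff_ne] at ha
      have hs' := List.pairwise_cons.mp hs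
      have htail := ih hs'.2 ha.2
      refine List.pairwise_cons.mpr ⟨?_, htail⟩
      intro x hx
      have hab : a < b := lt_of_le_of_ne (hs'.1 b (by simp)) ha.1
      rcases List.mem_cons.mp hx with rfl | hx
      · exact hab
      · have : b ≤ x := (List.pairwise_cons.mp hs'.2).1 x hx
        omega

lemma adjDup_of_nodup (l : List Int) (hn : l.Nodup) : adjDupB l = false := by
  induction l with
  | nil => simp [adjDupB]
  | cons a t ih =>
    cases t with
    | nil => simp [adjDupB]
    | cons b t' =>
      rw [adjDupB]
      have hne : a ≠ b := by
        intro h; subst h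
        exact (List.nodup_cons.mp hn).1 (by simp)
      simp only [Bool.or_eq_false_iff, beq_eq_false_iff_ne]
      exact ⟨hne, ih (List.nodup_cons.mp hn).2⟩

lemma alt_eq (sez : List (List Int)) :
    je_seznam_ciklov_alt sez =
      decide ((∀ el ∈ sez.flatMap (fun c => c), 0 < el) ∧
              (sez.flatMap (fun c => c)).Nodup) := by
  show (if (sez.flatMap (fun cikel => cikel)).any (fun el => decide (el ≤ 0)) then false
        else !adjDupB (PySem.List.sorted (sez.flatMap (fun cikel => cikel)) (fun x => x) false)) = _
  set vsi := sez.flatMap (fun cikel => cikel) with hvsi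
  by_cases hpos : ∀ el ∈ vsi, 0 < el
  · have hany : vsi.any (fun el => decide (el ≤ 0)) = false := by
      simp only [List.any_eq_false, decide_eq_true_eq]
      intro x hx
      exact not_le.mpr (hpos x hx)
    rw [hany]
    simp only [Bool.false_eq_true, if_false]
    have hperm : (PySem.List.sorted vsi (fun x => x) false).Perm vsi :=
      PySem.List.sorted_perm vsi (fun x => x) false
    by_cases hnod : vsi.Nodup
    · have hd : adjDupB (PySem.List.sorted vsi (fun x => x) false) = false :=
        adjDup_of_nodup _ (hperm.nodup_iff.mpr hnod)
      simp only [hd, Bool.not_false]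
      exact (decide_eq_true ⟨hpos, hnod⟩).symm
    · have hsnd : ¬ (PySem.List.sorted vsi (fun x => x) false).Nodup := by
        intro hh; exact hnod (hperm.nodup_iff.mp hh)
      have hpair : (PySem.List.sorted vsi (fun x => x) false).Pairwise (· ≤ ·) := by
        have := PySem.List.sorted_pairwise (xs := vsi) (key := fun x => x)
        simpa using this
      have hd : adjDupB (PySem.List.sorted vsi (fun x => x) false) = true := by
        by_contra hcontra
        have h' : adjDupB (PySem.List.sorted vsi (fun x => x) false) = false := by
          cases hb : adjDupB (PySem.List.sorted vsi (fun x => x) false)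
          · rfl
          · exact absurd hb hcontra
        exact hsnd ((adjDup_lt _ hpair h').imp ne_of_lt)
      have hno : ¬ ((∀ el ∈ vsi, 0 < el) ∧ vsi.Nodup) := fun hh => hnod hh.2
      simp only [hd, Bool.not_true]
      exact (decide_eq_false hno).symm
  · have hex : ∃ el ∈ vsi, el ≤ 0 := by
      push Not at hpos
      rcases hpos with ⟨x, hx, hx0⟩
      exact ⟨x, hx, by omega⟩
    have hany : vsi.any (fun el => decide (el ≤ 0)) = true := by
      simp only [List.any_eq_true, decide_eq_true_eq]
      exact hex
    rw [hany]
    have hpos' : ¬ ∀ el ∈ vsi, 0 < el := by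
      rcases hex with ⟨x, hx, hx0⟩
      intro hall
      have := hall x hx
      omega
    simp [hpos']

-- ===== VERDICT (by name: the statement is the Claim_ definition above) =====
theorem je_seznam_ciklov_spec : Claim_equal_je_seznam_ciklov := by
  intro sez _
  unfold Spec_je_seznam_ciklov je_seznam_ciklov
  rw [loopA_eq sez [] List.nodup_nil, alt_eq]
  simp
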